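-- pv_equiv track=rewrite | github.com/Lee-Ga-eun/- | PYTHON Lv1/이상한 문자 만들기.py | solution
-- ===== SOURCE A (Python) =====
-- def solution(s):
--     answer=""
--     for i in s.lower().split(" "): #공백을 기준으로 나눠 배열에 넣었다
--         for idx, j in enumerate(i): #i가 try이며 j는 t, r, y
--             if idx%2==0:
--                 j=chr(ord(j)-32) #짝수면 대문자
--             answer+=j
--         answer+=" "
--     return answer[:-1]
-- ===== SOURCE B (Python) =====
-- def solution(s):
--     out = []
--     idx = 0
--     for c in s.lower():
--         if c == ' ':
--             out.append(' ')
--             idx = 0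
--         else:
--             out.append(chr(ord(c) - 32) if idx % 2 == 0 else c)
--             idx += 1
--     return ''.join(out)
-- ===== Notes on version B (the rewrite author's own statement) =====
-- stated objective: simpler
-- what changed: Replaces A's split-on-space / per-word enumerate / append-trailing-space / trim pipeline by a single character-by-character pass over s.lower() that maintains an in-word index reset to 0 at each space, applying chr(ord(c)-32) at even indices.
import Mathlib
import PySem

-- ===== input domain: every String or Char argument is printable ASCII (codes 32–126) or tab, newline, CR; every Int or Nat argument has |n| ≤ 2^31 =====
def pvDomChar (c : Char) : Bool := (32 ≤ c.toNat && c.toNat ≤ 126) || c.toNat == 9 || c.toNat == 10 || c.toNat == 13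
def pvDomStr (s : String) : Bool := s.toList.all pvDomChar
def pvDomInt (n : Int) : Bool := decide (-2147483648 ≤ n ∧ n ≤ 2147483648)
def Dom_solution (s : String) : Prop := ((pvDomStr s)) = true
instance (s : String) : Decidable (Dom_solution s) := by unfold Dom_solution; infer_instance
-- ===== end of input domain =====

-- B replaces A's split(" ") / per-word append-space / trailing-trim pipeline by a single
-- character-by-character pass that resets a per-word index at each space (objective: simpler).

-- ===== PORT A =====
-- chr(ord(j) - 32): exact for code points ≥ 32; Python raises ValueError for codes < 32,
-- and Pre_solution excludes exactly those inputs.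
def solutionChr32 (c : Char) : Char := Char.ofNat (c.toNat - 32)

def solution (s : String) : String :=
  let lowered := PySem.Chars.lower s.toList                     -- s.lower()
  let words := PySem.Chars.splitOn lowered [' ']                -- .split(" ")
  let answer := words.foldl (fun answer w =>
      ((PySem.List.enumerate w 0).foldl (fun a p =>
          a ++ [if PySem.Int.mod p.1 2 = 0 then solutionChr32 p.2 else p.2]) answer)
        ++ [' ']) []                                            -- answer += j ; answer += " "
  String.ofList (PySem.List.slice answer none (some (-1)))      -- answer[:-1]

-- ===== PORT B =====
def solutionAltGo : List Char → Nat → List Char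
  | [], _ => []
  | c :: cs, idx =>
    if c = ' ' then ' ' :: solutionAltGo cs 0
    else (if idx % 2 = 0 then Char.ofNat (c.toNat - 32) else c) :: solutionAltGo cs (idx + 1)

def solution_alt (s : String) : String :=
  String.ofList (solutionAltGo (PySem.Chars.lower s.toList) 0)

-- ===== PRECONDITION & SPEC =====
-- Pre_ excludes exactly the inputs where the Python A raises ValueError: a control character
-- (code < 32, i.e. tab/newline/CR inside Dom) at an even index within its space-delimited
-- word, where chr(ord(c)-32) is chr of a negative number; B raises there too.
def Pre_solution (s : String) : Prop :=
  ∀ w ∈ PySem.Chars.splitOn s.toList [' '],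
    ∀ p ∈ PySem.List.enumerate w 0, PySem.Int.mod p.1 2 = 0 → 32 ≤ p.2.toNat
instance (s : String) : Decidable (Pre_solution s) := by unfold Pre_solution; infer_instance

def pvWitness_solution : String := "try hello world"

def Spec_solution (s : String) (out : String) : Prop := out = solution_alt s
instance (s : String) (out : String) : Decidable (Spec_solution s out) := by unfold Spec_solution; infer_instance

-- ===== CLAIM (what is proved, stated in full; the proofs are below) =====
def Claim_equal_solution : Prop := ∀ (s : String), Dom_solution s → Pre_solution s → Spec_solution s (solution s)

-- ===== LEMMAS AND PROOFS =====

-- first word / remaining words of a split on ' '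
def pvSplit : List Char → List Char × List (List Char)
  | [] => ([], [])
  | c :: cs =>
    let r := pvSplit cs
    if c = ' ' then ([], r.1 :: r.2) else (c :: r.1, r.2)

theorem pvSplit_go_spec (fuel : Nat) (l cur : List Char) (acc : List (List Char))
    (h : l.length ≤ fuel) :
    PySem.Chars.splitOn.go [' '] fuel l cur acc =
      acc.reverse ++ (cur.reverse ++ (pvSplit l).1) :: (pvSplit l).2 := by
  induction fuel generalizing l cur acc with
  | zero =>
    have : l = [] := by cases l <;> simp_all
    subst this
    simp [PySem.Chars.splitOn.go, pvSplit]
  | succ f ih =>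
    cases l with
    | nil => simp [PySem.Chars.splitOn.go, pvSplit]
    | cons c rest =>
      rw [PySem.Chars.splitOn.go]
      by_cases hc : c = ' '
      · subst hc
        have hp : [' '].isPrefixOf (' ' :: rest) = true := by simp [List.isPrefixOf]
        simp only [hp, if_pos, List.length_cons, List.drop_succ_cons, List.length_nil,
          List.drop_zero] at *
        rw [ih rest [] (List.reverse cur :: acc) (by omega)]
        simp [pvSplit]
      · have hp : [' '].isPrefixOf (c :: rest) = false := by
          simp [List.isPrefixOf]; exact fun h' => hc h'.symm
        simp only [hp, Bool.false_eq_true, if_neg, not_false_iff]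
        rw [ih rest (c :: cur) acc (by simpa using Nat.le_of_succ_le_succ (by simpa using h))]
        simp [pvSplit, hc]

theorem splitOn_eq_pvSplit (l : List Char) :
    PySem.Chars.splitOn l [' '] = (pvSplit l).1 :: (pvSplit l).2 := by
  unfold PySem.Chars.splitOn
  rw [pvSplit_go_spec (l.length + 1) l [] [] (by omega)]
  simp

def pvTr (p : Int × Char) : Char :=
  if PySem.Int.mod p.1 2 = 0 then solutionChr32 p.2 else p.2

theorem inner_foldl (w : List Char) (k : Int) (a : List Char) :
    (PySem.List.enumerate w k).foldl (fun a p =>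
        a ++ [if PySem.Int.mod p.1 2 = 0 then solutionChr32 p.2 else p.2]) a
      = a ++ (PySem.List.enumerate w k).map pvTr := by
  induction w generalizing k a with
  | nil => simp [PySem.List.enumerate_nil]
  | cons c cs ih =>
    rw [PySem.List.enumerate_cons]
    simp only [List.foldl_cons, List.map_cons]
    rw [ih]
    simp [pvTr]

def pvWordOut (w : List Char) : List Char := (PySem.List.enumerate w 0).map pvTr ++ [' ']

theorem outer_foldl (ws : List (List Char)) (a : List Char) :
    ws.foldl (fun answer w =>
      ((PySem.List.enumerate w 0).foldl (fun a p =>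
          a ++ [if PySem.Int.mod p.1 2 = 0 then solutionChr32 p.2 else p.2]) answer)
        ++ [' ']) a = a ++ (ws.map pvWordOut).flatten := by
  induction ws generalizing a with
  | nil => simp
  | cons w ws ih =>
    simp only [List.foldl_cons, List.map_cons, List.flatten_cons]
    rw [inner_foldl, ih]
    simp [pvWordOut]

theorem pvTr_natCast (k : Nat) (c : Char) :
    pvTr ((k : Int), c) = if k % 2 = 0 then solutionChr32 c else c := by
  unfold pvTr
  rw [show ((2:Int) = ((2:Nat):Int)) from rfl, PySem.Int.mod_natCast]
  by_cases h : k % 2 = 0 <;> simp [h]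
  omega

theorem altGo_spec (l : List Char) (k : Nat) :
    solutionAltGo l k ++ [' ']
      = (PySem.List.enumerate (pvSplit l).1 (k : Int)).map pvTr ++ [' ']
        ++ ((pvSplit l).2.map pvWordOut).flatten := by
  induction l generalizing k with
  | nil => simp [solutionAltGo, pvSplit, PySem.List.enumerate_nil]
  | cons c cs ih =>
    by_cases hc : c = ' '
    · subst hc
      simp only [solutionAltGo, pvSplit, if_true, List.map_cons,
        List.flatten_cons, PySem.List.enumerate_nil, List.map_nil, List.nil_append]
      have ih0 := ih 0
      rw [Nat.cast_zero] at ih0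
      rw [List.cons_append, ih0]
      simp [pvWordOut]
    · simp only [solutionAltGo, if_neg hc, pvSplit]
      rw [PySem.List.enumerate_cons]
      simp only [List.map_cons, List.cons_append]
      rw [ih (k+1)]
      rw [pvTr_natCast]
      push_cast
      simp [solutionChr32]

-- ===== VERDICT (by name: the statement is the Claim_ definition above) =====
theorem solution_spec : Claim_equal_solution := by
  unfold Claim_equal_solution
  intro s _ _
  unfold Spec_solution solution solution_alt
  simp only []
  rw [splitOn_eq_pvSplit, outer_foldl, List.nil_append, PySem.List.slice_to_neg_one]
  have h := altGo_spec (PySem.Chars.lower s.toList) 0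
  rw [Nat.cast_zero] at h
  have hflat : ((((pvSplit (PySem.Chars.lower s.toList)).1 ::
        (pvSplit (PySem.Chars.lower s.toList)).2)).map pvWordOut).flatten
      = solutionAltGo (PySem.Chars.lower s.toList) 0 ++ [' '] := by
    simp only [List.map_cons, List.flatten_cons, pvWordOut]
    exact h.symm
  rw [hflat, List.dropLast_concat]
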